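-- pv_equiv track=rewrite | github.com/Fvitu/WhatsAnalyzer | whatsapp_statistics.py | should_ignore_message
-- ===== SOURCE A (Python) =====
-- def should_ignore_message(sender, message):
--     """
--     Devuelve True si el mensaje es de sistema o no se considera conversacional.
--     Se ignoran:
--       - Mensajes cuyo texto sea "null".
--       - Mensajes con avisos típicos de sistema (cifrado, creación de grupo, etc.).
--     Soporta patrones en inglés y español.
--     """
--     texto = message.strip().lower()
--     ignore_patterns = [
--         # Genéricos
--         "null",
--         # Inglés - Cifrado y privacidad
--         "end-to-end encrypted",
--         "messages and calls are end-to-end encrypted",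
--         "only people in this chat can read",
--         "learn more",
--         "your security code with",
--         "security code changed",
--         "tap to learn more",
--         # Inglés - Acciones de grupo
--         "created group",
--         "added you",
--         "added to this group",
--         "removed from this group",
--         "left the group",
--         "changed the subject",
--         "changed this group's icon",
--         "changed the group description",
--         "you're now an admin",
--         "is no longer an admin",
--         "changed their phone number",
--         "deleted this message",
--         "this message was deleted",
--         "you deleted this message",
--         "waiting for this message",
--         "missed voice call",
--         "missed video call",
--         # Español - Cifrado y privacidad
--         "cifrado de extremo a extremo",
--         "los mensajes y las llamadas están cifrados",
--         "solo las personas de este chat pueden leer",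
--         "más información",
--         "tu código de seguridad con",
--         "el código de seguridad cambió",
--         "toca para más información",
--         # Español - Acciones de grupo
--         "creó el grupo",
--         "creó este grupo",
--         "te añadió",
--         "te agregó",
--         "añadió",
--         "agregó",
--         "se unió con el enlace",
--         "salió del grupo",
--         "abandonó el grupo",
--         "eliminó a",
--         "expulsó a",
--         "ahora eres administrador",
--         "ya no es administrador",
--         "cambió el asunto",
--         "cambió el icono del grupo",
--         "cambió la descripción del grupo",
--         "cambió su número de teléfono",
--         "eliminó este mensaje",
--         "eliminaste este mensaje",
--         "se eliminó este mensaje",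
--         "esperando este mensaje",
--         "llamada de voz perdida",
--         "videollamada perdida",
--         # Mensajes de ubicación
--         "location:",
--         "ubicación:",
--         "live location",
--         "ubicación en tiempo real",
--         # Contactos compartidos
--         "contact card omitted",
--         "tarjeta de contacto omitida",
--     ]
--     for pat in ignore_patterns:
--         if pat in texto:
--             return True
--     return False
-- ===== SOURCE B (Python) =====
-- # B: one text-driven scan with a first-character index built once,
-- # instead of A's loop over every pattern calling "in".
-- _PATTERNS = [
--     'null',
--     'end-to-end encrypted',
--     'messages and calls are end-to-end encrypted',
--     'only people in this chat can read',
--     'learn more',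
--     'your security code with',
--     'security code changed',
--     'tap to learn more',
--     'created group',
--     'added you',
--     'added to this group',
--     'removed from this group',
--     'left the group',
--     'changed the subject',
--     "changed this group's icon",
--     'changed the group description',
--     "you're now an admin",
--     'is no longer an admin',
--     'changed their phone number',
--     'deleted this message',
--     'this message was deleted',
--     'you deleted this message',
--     'waiting for this message',
--     'missed voice call',
--     'missed video call',
--     'cifrado de extremo a extremo',
--     'los mensajes y las llamadas están cifrados',
--     'solo las personas de este chat pueden leer',
--     'más información',
--     'tu código de seguridad con',
--     'el código de seguridad cambió',
--     'toca para más información',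
--     'creó el grupo',
--     'creó este grupo',
--     'te añadió',
--     'te agregó',
--     'añadió',
--     'agregó',
--     'se unió con el enlace',
--     'salió del grupo',
--     'abandonó el grupo',
--     'eliminó a',
--     'expulsó a',
--     'ahora eres administrador',
--     'ya no es administrador',
--     'cambió el asunto',
--     'cambió el icono del grupo',
--     'cambió la descripción del grupo',
--     'cambió su número de teléfono',
--     'eliminó este mensaje',
--     'eliminaste este mensaje',
--     'se eliminó este mensaje',
--     'esperando este mensaje',
--     'llamada de voz perdida',
--     'videollamada perdida',
--     'location:',
--     'ubicación:',
--     'live location',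
--     'ubicación en tiempo real',
--     'contact card omitted',
--     'tarjeta de contacto omitida',
-- ]
--
-- _INDEX = {}
-- for _p in _PATTERNS:
--     _INDEX.setdefault(_p[0], []).append(_p)
--
--
-- def should_ignore_message(sender, message):
--     texto = message.strip().lower()
--     for i, ch in enumerate(texto):
--         for p in _INDEX.get(ch, ()):
--             if texto.startswith(p, i):
--                 return True
--     return False
-- ===== Notes on version B (the rewrite author's own statement) =====
-- stated objective: alternative
-- what changed: B replaces A's pattern-by-pattern 'in' loop with a single text-driven scan: a dict indexing the patterns by first character is built once, and at each text position only the patterns starting with that character are prefix-tested.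
import Mathlib
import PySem

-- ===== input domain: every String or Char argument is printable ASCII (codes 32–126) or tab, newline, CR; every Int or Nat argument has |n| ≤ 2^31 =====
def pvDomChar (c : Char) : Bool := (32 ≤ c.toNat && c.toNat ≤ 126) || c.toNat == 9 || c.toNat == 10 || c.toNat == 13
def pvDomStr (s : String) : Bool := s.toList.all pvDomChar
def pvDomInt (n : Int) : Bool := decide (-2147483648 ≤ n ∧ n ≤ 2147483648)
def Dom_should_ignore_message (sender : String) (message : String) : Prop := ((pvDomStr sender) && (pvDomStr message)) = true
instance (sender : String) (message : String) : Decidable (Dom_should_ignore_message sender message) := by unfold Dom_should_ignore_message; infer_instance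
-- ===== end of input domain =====

-- B replaces A's pattern-by-pattern substring loop with one text-driven scan
-- using a first-character index built once (objective: alternative; return value only).
-- ===== PORT A =====
def pvPatternsA : List String := [
    "null",
    "end-to-end encrypted",
    "messages and calls are end-to-end encrypted",
    "only people in this chat can read",
    "learn more",
    "your security code with",
    "security code changed",
    "tap to learn more",
    "created group",
    "added you",
    "added to this group",
    "removed from this group",
    "left the group",
    "changed the subject",
    "changed this group's icon",
    "changed the group description",
    "you're now an admin",
    "is no longer an admin",
    "changed their phone number",
    "deleted this message",
    "this message was deleted",
    "you deleted this message",
    "waiting for this message",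
    "missed voice call",
    "missed video call",
    "cifrado de extremo a extremo",
    "los mensajes y las llamadas están cifrados",
    "solo las personas de este chat pueden leer",
    "más información",
    "tu código de seguridad con",
    "el código de seguridad cambió",
    "toca para más información",
    "creó el grupo",
    "creó este grupo",
    "te añadió",
    "te agregó",
    "añadió",
    "agregó",
    "se unió con el enlace",
    "salió del grupo",
    "abandonó el grupo",
    "eliminó a",
    "expulsó a",
    "ahora eres administrador",
    "ya no es administrador",
    "cambió el asunto",
    "cambió el icono del grupo",
    "cambió la descripción del grupo",
    "cambió su número de teléfono",
    "eliminó este mensaje",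
    "eliminaste este mensaje",
    "se eliminó este mensaje",
    "esperando este mensaje",
    "llamada de voz perdida",
    "videollamada perdida",
    "location:",
    "ubicación:",
    "live location",
    "ubicación en tiempo real",
    "contact card omitted",
    "tarjeta de contacto omitida"]

def pvLoopA (texto : String) : List String → Bool
  | [] => false
  | pat :: rest => if PySem.Str.isIn pat texto then true else pvLoopA texto rest

def should_ignore_message (sender : String) (message : String) : Bool :=
  pvLoopA (PySem.Str.lower (PySem.Str.strip message)) pvPatternsA

-- ===== PORT B =====
def pvPatternsB : List (List Char) := [
    "null".toList,
    "end-to-end encrypted".toList,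
    "messages and calls are end-to-end encrypted".toList,
    "only people in this chat can read".toList,
    "learn more".toList,
    "your security code with".toList,
    "security code changed".toList,
    "tap to learn more".toList,
    "created group".toList,
    "added you".toList,
    "added to this group".toList,
    "removed from this group".toList,
    "left the group".toList,
    "changed the subject".toList,
    "changed this group's icon".toList,
    "changed the group description".toList,
    "you're now an admin".toList,
    "is no longer an admin".toList,
    "changed their phone number".toList,
    "deleted this message".toList,
    "this message was deleted".toList,
    "you deleted this message".toList,
    "waiting for this message".toList,
    "missed voice call".toList,
    "missed video call".toList,
    "cifrado de extremo a extremo".toList,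
    "los mensajes y las llamadas están cifrados".toList,
    "solo las personas de este chat pueden leer".toList,
    "más información".toList,
    "tu código de seguridad con".toList,
    "el código de seguridad cambió".toList,
    "toca para más información".toList,
    "creó el grupo".toList,
    "creó este grupo".toList,
    "te añadió".toList,
    "te agregó".toList,
    "añadió".toList,
    "agregó".toList,
    "se unió con el enlace".toList,
    "salió del grupo".toList,
    "abandonó el grupo".toList,
    "eliminó a".toList,
    "expulsó a".toList,
    "ahora eres administrador".toList,
    "ya no es administrador".toList,
    "cambió el asunto".toList,
    "cambió el icono del grupo".toList,
    "cambió la descripción del grupo".toList,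
    "cambió su número de teléfono".toList,
    "eliminó este mensaje".toList,
    "eliminaste este mensaje".toList,
    "se eliminó este mensaje".toList,
    "esperando este mensaje".toList,
    "llamada de voz perdida".toList,
    "videollamada perdida".toList,
    "location:".toList,
    "ubicación:".toList,
    "live location".toList,
    "ubicación en tiempo real".toList,
    "contact card omitted".toList,
    "tarjeta de contacto omitida".toList]

-- _INDEX.setdefault(p[0], []).append(p): functional reading of the in-place append
def pvIndexB : PySem.Dict Char (List (List Char)) :=
  pvPatternsB.foldl
    (fun d p =>
      match p.head? with
      | some c => d.insert c (d.getD c [] ++ [p])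
      | none => d)
    PySem.Dict.empty

-- the loop over enumerate(texto): position i ↦ the suffix texto[i:];
-- texto.startswith(p, i) (0 ≤ i ≤ len) is exactly 'p is a prefix of the suffix'
def pvScanB : List Char → Bool
  | [] => false
  | c :: rest =>
    ((pvIndexB.getD c []).any (fun p => PySem.Chars.startswith (c :: rest) p)) || pvScanB rest

def should_ignore_message_alt (sender : String) (message : String) : Bool :=
  pvScanB (PySem.Chars.lower (PySem.Chars.strip message.toList))


-- ===== PRECONDITION & SPEC =====
def Spec_should_ignore_message (sender : String) (message : String) (out : Bool) : Prop := out = should_ignore_message_alt sender message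
instance (sender : String) (message : String) (out : Bool) : Decidable (Spec_should_ignore_message sender message out) := by unfold Spec_should_ignore_message; infer_instance

-- ===== CLAIM (what is proved, stated in full; the proofs are below) =====
def Claim_equal_should_ignore_message : Prop := ∀ (sender : String) (message : String), Dom_should_ignore_message sender message → Spec_should_ignore_message sender message (should_ignore_message sender message)

-- ===== LEMMAS AND PROOFS =====

theorem pv_ne_nil : ∀ p ∈ pvPatternsB, p ≠ [] := by decide

theorem pv_mapA : pvPatternsA.map String.toList = pvPatternsB := by rfl

theorem pv_foldl_getD (l : List (List Char)) (d : PySem.Dict Char (List (List Char))) (c : Char) :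
    (l.foldl
      (fun d p =>
        match p.head? with
        | some c' => d.insert c' (d.getD c' [] ++ [p])
        | none => d) d).getD c []
      = d.getD c [] ++ l.filter (fun q => q.head? == some c) := by
  induction l generalizing d with
  | nil => simp
  | cons q l ih =>
    cases hq : q.head? with
    | none => simp [hq, ih]
    | some c' =>
      by_cases hc : c = c'
      · subst hc
        simp [hq, ih]
      · have hcc : c' ≠ c := fun h => hc h.symm
        simp [hq, ih, PySem.Dict.getD_insert, hc, hcc]

theorem pv_mem_index (c : Char) (p : List Char) :
    p ∈ pvIndexB.getD c [] ↔ p ∈ pvPatternsB ∧ p.head? = some c := by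
  unfold pvIndexB
  rw [pv_foldl_getD]
  simp [List.mem_filter]

theorem pv_scan_iff (s : List Char) :
    pvScanB s = true ↔ ∃ p ∈ pvPatternsB, ∃ j, p <+: s.drop j := by
  induction s with
  | nil =>
    simp only [pvScanB, List.drop_nil, List.prefix_nil, Bool.false_eq_true, false_iff]
    rintro ⟨p, hp, _, rfl⟩
    exact pv_ne_nil [] hp rfl
  | cons c rest ih =>
    simp only [pvScanB, Bool.or_eq_true, List.any_eq_true, ih,
      PySem.Chars.startswith_iff, pv_mem_index]
    constructor
    · rintro (⟨p, ⟨hp, _⟩, hpre⟩ | ⟨p, hp, j, hpre⟩)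
      · exact ⟨p, hp, 0, hpre⟩
      · exact ⟨p, hp, j + 1, hpre⟩
    · rintro ⟨p, hp, j, hpre⟩
      cases j with
      | zero =>
        left
        refine ⟨p, ⟨hp, ?_⟩, hpre⟩
        cases p with
        | nil => exact absurd rfl (pv_ne_nil [] hp)
        | cons a t =>
          obtain ⟨u, hu⟩ := hpre
          injection hu with h1 _
          simp [h1]
      | succ k => exact Or.inr ⟨p, hp, k, hpre⟩

theorem pv_anyA (texto : String) (l : List String) :
    pvLoopA texto l = l.any (fun pat => PySem.Str.isIn pat texto) := by
  induction l with
  | nil => rfl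
  | cons pat rest ih => simp [pvLoopA, ih]

theorem pv_main (sender : String) (message : String) :
    should_ignore_message sender message = should_ignore_message_alt sender message := by
  unfold should_ignore_message should_ignore_message_alt
  rw [pv_anyA, Bool.eq_iff_iff, pv_scan_iff]
  simp only [List.any_eq_true, PySem.Str.isIn_eq, PySem.Str.toList_lower, PySem.Str.toList_strip,
    ← PySem.Chars.exists_prefix_drop_iff_isIn, ← pv_mapA, List.mem_map]
  constructor
  · rintro ⟨pat, hpat, h⟩; exact ⟨pat.toList, ⟨pat, hpat, rfl⟩, h⟩
  · rintro ⟨p, ⟨pat, hpat, rfl⟩, h⟩; exact ⟨pat, hpat, h⟩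

-- ===== VERDICT (by name: the statement is the Claim_ definition above) =====
theorem should_ignore_message_spec : Claim_equal_should_ignore_message :=
  fun sender message _ => pv_main sender message
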